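-- pv_equiv track=rewrite | github.com/jakuberan/AoC-2021 | day_19/main.py | get_common_beacons
-- ===== SOURCE A (Python) =====
-- def get_common_beacons(distances, comb):
--     """
--     Calculate number of beacons in common between two scanners
--     """
--     similarities = {}
--     for i in distances:
--         for j in distances:
--             if i > j:
--                 simil = [di in distances[j] for di in distances[i]]
--                 if sum(simil) in comb:
--                     similarities[(i, j)] = comb[sum(simil)]
--     return similarities
-- ===== SOURCE B (Python) =====
-- def get_common_beacons(distances, comb):
--     """
--     Calculate number of beacons in common between two scanners
--     """
--     # per-scanner multiplicity counters + inverted index: value -> scanner ids containing it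
--     index = {}
--     mults = {}
--     for sid, ds in distances.items():
--         mult = {}
--         for v in ds:
--             mult[v] = mult.get(v, 0) + 1
--         mults[sid] = mult
--         for v in mult:
--             index.setdefault(v, []).append(sid)
--     # accumulate shared-distance counts per ordered pair (i, j) with j < i
--     pair_counts = {}
--     for sid, mult in mults.items():
--         for v, m in mult.items():
--             for j in index.get(v, []):
--                 if j < sid:
--                     pair_counts[(sid, j)] = pair_counts.get((sid, j), 0) + m
--     similarities = {}
--     for i in distances:
--         for j in distances:
--             if i > j:
--                 count = pair_counts.get((i, j), 0)
--                 if count in comb: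
--                     similarities[(i, j)] = comb[count]
--     return similarities
-- ===== Notes on version B (the rewrite author's own statement) =====
-- stated objective: faster
-- what changed: Replaces A's per-pair nested membership rescans with an inverted index (distance value -> scanner ids) plus per-scanner multiplicity counters and a single per-bucket pair-count accumulation; the final pass over scanner pairs only looks the counts up.
import Mathlib
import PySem

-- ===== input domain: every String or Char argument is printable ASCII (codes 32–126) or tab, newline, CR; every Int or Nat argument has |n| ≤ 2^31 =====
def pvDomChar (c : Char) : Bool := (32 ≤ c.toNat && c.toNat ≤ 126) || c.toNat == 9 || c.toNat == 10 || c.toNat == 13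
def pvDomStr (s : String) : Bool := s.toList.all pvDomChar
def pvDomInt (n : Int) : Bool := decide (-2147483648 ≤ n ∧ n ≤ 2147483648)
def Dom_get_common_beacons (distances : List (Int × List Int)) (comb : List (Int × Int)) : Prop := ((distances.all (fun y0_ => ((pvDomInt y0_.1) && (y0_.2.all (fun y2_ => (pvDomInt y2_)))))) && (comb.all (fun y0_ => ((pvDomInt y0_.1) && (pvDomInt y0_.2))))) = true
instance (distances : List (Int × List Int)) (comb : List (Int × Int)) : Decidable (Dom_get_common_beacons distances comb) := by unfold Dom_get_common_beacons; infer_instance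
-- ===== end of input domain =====

-- B replaces A's per-pair membership rescans by an inverted index (distance value -> scanner ids)
-- plus a single per-bucket pair-count accumulation; objective: faster on shared-value-sparse data.

-- ===== PORT A =====
def get_common_beacons (distances : List (Int × List Int)) (comb : List (Int × Int)) : List (Int × Int × Int) :=
  let d := PySem.Dict.ofList distances
  let c := PySem.Dict.ofList comb
  let similarities : PySem.Dict (Int × Int) Int :=
    d.keys.foldl (fun sims i =>
      d.keys.foldl (fun sims j =>
        if j < i then
          let simil := (d.getD i []).map (fun di => if (d.getD j []).contains di then (1 : Int) else 0)
          if c.contains simil.sum then sims.insert (i, j) (c.getD simil.sum 0) else sims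
        else sims) sims) PySem.Dict.empty
  similarities.items.map (fun p => (p.1.1, p.1.2, p.2))

-- ===== PORT B =====
def get_common_beacons_alt (distances : List (Int × List Int)) (comb : List (Int × Int)) : List (Int × Int × Int) :=
  let d := PySem.Dict.ofList distances
  let c := PySem.Dict.ofList comb
  -- one pass: per-scanner multiplicity counters (mults) and the inverted index (value -> scanner ids)
  let st := d.items.foldl
    (fun (st : PySem.Dict Int (PySem.Dict Int Int) × PySem.Dict Int (List Int)) p =>
      let mult := p.2.foldl (fun m v => m.insert v (m.getD v 0 + 1)) PySem.Dict.empty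
      (st.1.insert p.1 mult, mult.keys.foldl (fun ix v => ix.modify v [] (· ++ [p.1])) st.2))
    (PySem.Dict.empty, PySem.Dict.empty)
  let mults := st.1
  let index := st.2
  -- accumulate shared-distance counts per ordered pair (i, j) with j < i
  let pairCounts : PySem.Dict (Int × Int) Int :=
    mults.items.foldl (fun pc p =>
      p.2.items.foldl (fun pc q =>
        (index.getD q.1 []).foldl (fun pc j =>
          if j < p.1 then pc.modify (p.1, j) 0 (· + q.2) else pc) pc) pc) PySem.Dict.empty
  let similarities : PySem.Dict (Int × Int) Int :=
    d.keys.foldl (fun sims i =>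
      d.keys.foldl (fun sims j =>
        if j < i then
          let count := pairCounts.getD (i, j) 0
          if c.contains count then sims.insert (i, j) (c.getD count 0) else sims
        else sims) sims) PySem.Dict.empty
  similarities.items.map (fun p => (p.1.1, p.1.2, p.2))

-- ===== PRECONDITION & SPEC =====
def Spec_get_common_beacons (distances : List (Int × List Int)) (comb : List (Int × Int)) (out : List (Int × Int × Int)) : Prop := out = get_common_beacons_alt distances comb
instance (distances : List (Int × List Int)) (comb : List (Int × Int)) (out : List (Int × Int × Int)) : Decidable (Spec_get_common_beacons distances comb out) := by unfold Spec_get_common_beacons; infer_instance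

-- ===== CLAIM (what is proved, stated in full; the proofs are below) =====
def Claim_equal_get_common_beacons : Prop := ∀ (distances : List (Int × List Int)) (comb : List (Int × Int)), Dom_get_common_beacons distances comb → Spec_get_common_beacons distances comb (get_common_beacons distances comb)

-- ===== LEMMAS AND PROOFS =====

theorem idx_one (L : List Int) (s : Int) :
    ∀ (ix : PySem.Dict Int (List Int)) (v : Int),
      (L.foldl (fun ix u => ix.modify u [] (· ++ [s])) ix).getD v []
        = ix.getD v [] ++ List.replicate (L.count v) s := by
  induction L with
  | nil => simp
  | cons u L ih =>
    intro ix v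
    simp only [List.foldl_cons, ih, List.count_cons]
    rw [PySem.Dict.getD_modify]
    by_cases h : v = u
    · simp [h, List.replicate_succ]
    · simp [h, Ne.symm h]

theorem idx_all (l : List (Int × List Int)) :
    ∀ (ix : PySem.Dict Int (List Int)) (v : Int),
      (l.foldl (fun ix p =>
          (PySem.Set.ofList p.2).foldl (fun ix u => ix.modify u [] (· ++ [p.1])) ix) ix).getD v []
        = ix.getD v [] ++ (l.filter (fun p => decide (v ∈ p.2))).map Prod.fst := by
  induction l with
  | nil => simp
  | cons p l ih =>
    intro ix v
    simp only [List.foldl_cons, ih, idx_one, List.filter_cons]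
    by_cases h : v ∈ p.2
    · simp [h]
    · have h0 : (PySem.Set.ofList p.2).count v = 0 :=
        List.count_eq_zero.2 (by simp [PySem.Set.mem_ofList, h])
      simp [h, h0]

theorem bucket_count (l : List (Int × List Int)) (j : Int) (dsj : List Int) (v : Int) :
    (l.map Prod.fst).Nodup → (j, dsj) ∈ l →
      ((((l.filter (fun p => decide (v ∈ p.2))).map Prod.fst).count j : Int))
        = if v ∈ dsj then 1 else 0 := by
  induction l with
  | nil => simp
  | cons p l ih
  =>
    intro hnd hm
    simp only [List.map_cons, List.nodup_cons] at hnd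
    simp only [List.filter_cons]
    by_cases h : p.1 = j
    · have hp : p = (j, dsj) := by
        rcases List.mem_cons.1 hm with h' | h'
        · exact h'.symm
        · exact absurd (h ▸ List.mem_map_of_mem h') hnd.1
      have hz : ((l.filter (fun p => decide (v ∈ p.2))).map Prod.fst).count j = 0 := by
        apply List.count_eq_zero.2
        intro hc
        rcases List.mem_map.1 hc with ⟨q, hq, rfl⟩
        exact hnd.1 (h ▸ List.mem_map_of_mem (List.mem_of_mem_filter hq))
      subst hp
      by_cases hv : v ∈ dsj
      · simp [hv, hz]
      · simp [hv, hz]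
    · have hm' : (j, dsj) ∈ l := by
        rcases List.mem_cons.1 hm with h' | h'
        · exact absurd (by rw [← h']) h
        · exact h'
      by_cases hv : v ∈ p.2
      · simp only [hv, decide_true, if_true, List.map_cons, List.count_cons]
        simp [h, ih hnd.2 hm']
      · simp [hv, ih hnd.2 hm']

theorem cnt_inner (B : List Int) (s i j m : Int) :
    ∀ (pc : PySem.Dict (Int × Int) Int),
      (B.foldl (fun pc j' => if j' < s then pc.modify (s, j') 0 (· + m) else pc) pc).getD (i, j) 0
        = pc.getD (i, j) 0 + (if s = i ∧ j < s then m * (B.count j : Int) else 0) := by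
  induction B with
  | nil => simp
  | cons b B ih =>
    intro pc
    simp only [List.foldl_cons, List.count_cons]
    by_cases hb : b < s
    · rw [if_pos hb, ih, PySem.Dict.getD_modify]
      by_cases hk : ((i, j) : Int × Int) = (s, b)
      · obtain ⟨h1, h2⟩ := Prod.mk.injEq .. ▸ hk
        simp_all
        ring
      · rw [if_neg hk]
        by_cases hc : s = i ∧ j < s
        · have : ¬ (b = j) := by rintro rfl; exact hk (by simp [hc.1])
          simp [hc, this]
        · simp [hc]
    · rw [if_neg hb, ih]
      by_cases hc : s = i ∧ j < s
      · have : ¬ (b = j) := by rintro rfl; exact hb hc.2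
        simp [hc, this]
      · simp [hc]

theorem cnt_mid (ix : PySem.Dict Int (List Int)) (qs : List (Int × Int)) (s i j : Int) :
    ∀ (pc : PySem.Dict (Int × Int) Int),
      (qs.foldl (fun pc q =>
          (ix.getD q.1 []).foldl (fun pc j' => if j' < s then pc.modify (s, j') 0 (· + q.2) else pc) pc) pc).getD (i, j) 0
        = pc.getD (i, j) 0 +
            (if s = i ∧ j < s then (qs.map (fun q => q.2 * ((ix.getD q.1 []).count j : Int))).sum else 0) := by
  induction qs with
  | nil => simp
  | cons q qs ih =>
    intro pc
    simp only [List.foldl_cons, ih, cnt_inner, List.map_cons, List.sum_cons]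
    by_cases hc : s = i ∧ j < s
    · simp only [if_pos hc]; ring
    · simp only [if_neg hc]; ring

theorem cnt_all (ix : PySem.Dict Int (List Int)) (l : List (Int × PySem.Dict Int Int)) (i j : Int) :
    ∀ (pc : PySem.Dict (Int × Int) Int),
      (l.foldl (fun pc p =>
          p.2.items.foldl (fun pc q =>
            (ix.getD q.1 []).foldl (fun pc j' => if j' < p.1 then pc.modify (p.1, j') 0 (· + q.2) else pc) pc) pc) pc).getD (i, j) 0
        = pc.getD (i, j) 0 +
            (l.map (fun p => if p.1 = i ∧ j < p.1 then (p.2.items.map (fun q => q.2 * ((ix.getD q.1 []).count j : Int))).sum else 0)).sum := by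
  induction l with
  | nil => simp
  | cons p l ih =>
    intro pc
    simp only [List.foldl_cons, ih, cnt_mid, List.map_cons, List.sum_cons]
    by_cases hc : p.1 = i ∧ j < p.1
    · simp only [if_pos hc]; ring
    · simp only [if_neg hc]; ring

theorem uniq_sum {β : Type} (l : List (Int × β)) (i : Int) (b : β) (f : β → Int) :
    (l.map Prod.fst).Nodup → (i, b) ∈ l →
      (l.map (fun p => if p.1 = i then f p.2 else 0)).sum = f b := by
  induction l with
  | nil => simp
  | cons p l ih =>
    intro hnd hm
    simp only [List.map_cons, List.nodup_cons] at hnd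
    simp only [List.map_cons, List.sum_cons]
    by_cases h : p.1 = i
    · have hp : p = (i, b) := by
        rcases List.mem_cons.1 hm with h' | h'
        · exact h'.symm
        · exact absurd (h ▸ List.mem_map_of_mem h') hnd.1
      have hz : (l.map (fun p => if p.1 = i then f p.2 else 0)).sum = 0 := by
        apply List.sum_eq_zero
        intro x hx
        rcases List.mem_map.1 hx with ⟨q, hq, rfl⟩
        have : q.1 ≠ i := fun he => hnd.1 (h ▸ he ▸ List.mem_map_of_mem hq)
        simp [this]
      subst hp
      simp [hz]
    · have hm' : (i, b) ∈ l := by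
        rcases List.mem_cons.1 hm with h' | h'
        · exact absurd (by rw [← h']) h
        · exact h'
      simp [h, ih hnd.2 hm']

theorem sum_single (S : List Int) (x : Int) (g : Int → Int) :
    S.Nodup → (S.map (fun v => if v = x then g v else 0)).sum = if x ∈ S then g x else 0 := by
  induction S with
  | nil => simp
  | cons a S ih =>
    intro hnd
    simp only [List.nodup_cons] at hnd
    simp only [List.map_cons, List.sum_cons, List.mem_cons]
    by_cases h : a = x
    · have hz : (S.map (fun v => if v = x then g v else 0)).sum = 0 := by
        apply List.sum_eq_zero
        intro y hy
        rcases List.mem_map.1 hy with ⟨v, hv, rfl⟩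
        have hvx : v ≠ x := fun he => hnd.1 ((he.trans h.symm) ▸ hv)
        simp [hvx]
      simp [h, hz]
    · have hxa : ¬ (x = a) := fun he => h he.symm
      simp only [if_neg h, zero_add, ih hnd.2]
      by_cases hx : x ∈ S
      · simp [hx]
      · simp [hx, hxa]

theorem group_sum (f : Int → Int) (L : List Int) :
    ((PySem.Set.ofList L).map (fun v => (L.count v : Int) * f v)).sum = (L.map f).sum := by
  induction L using List.reverseRecOn with
  | nil => simp
  | append_singleton L x ih =>
    have hsplit : ∀ (S : List Int), (S.map (fun v => ((L ++ [x]).count v : Int) * f v)).sum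
        = (S.map (fun v => (L.count v : Int) * f v)).sum + (S.map (fun v => if v = x then f v else 0)).sum := by
      intro S
      rw [← PySem.List.sum_map_add_int]
      apply congrArg List.sum
      apply List.map_congr_left
      intro v _
      by_cases h : v = x
      · subst h; simp [List.count_append]; ring
      · simp [List.count_append, h, List.count_singleton]
        exact Or.inl (fun he => h he.symm)
    rw [PySem.Set.ofList_append_singleton, List.map_append, List.sum_append]
    by_cases hx : x ∈ L
    · rw [PySem.Set.add_of_mem (by simp [PySem.Set.mem_ofList, hx])]
      rw [hsplit, ih, sum_single _ _ _ (PySem.Set.nodup_ofList L)]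
      simp [PySem.Set.mem_ofList, hx]
    · rw [PySem.Set.add_of_not_mem (by simp [PySem.Set.mem_ofList, hx])]
      rw [List.map_append, List.sum_append, hsplit, ih, sum_single _ _ _ (PySem.Set.nodup_ofList L)]
      simp [PySem.Set.mem_ofList, hx, List.count_eq_zero.2 hx]

theorem pair_count_eq (d : PySem.Dict Int (List Int)) (hnd : d.keys.Nodup) (i j : Int)
    (hi : i ∈ d.keys) (hj : j ∈ d.keys) (hji : j < i) :
    (((d.items.foldl
          (fun (st : PySem.Dict Int (PySem.Dict Int Int) × PySem.Dict Int (List Int)) p =>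
            (st.1.insert p.1 (p.2.foldl (fun m v => m.insert v (m.getD v 0 + 1)) (PySem.Dict.empty : PySem.Dict Int Int)),
             (p.2.foldl (fun m v => m.insert v (m.getD v 0 + 1)) (PySem.Dict.empty : PySem.Dict Int Int)).keys.foldl
               (fun ix v => ix.modify v [] (· ++ [p.1])) st.2))
          (PySem.Dict.empty, PySem.Dict.empty)).1.items.foldl
        (fun pc p =>
          p.2.items.foldl (fun pc q =>
            (((d.items.foldl
                (fun (st : PySem.Dict Int (PySem.Dict Int Int) × PySem.Dict Int (List Int)) p =>
                  (st.1.insert p.1 (p.2.foldl (fun m v => m.insert v (m.getD v 0 + 1)) (PySem.Dict.empty : PySem.Dict Int Int)),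
                   (p.2.foldl (fun m v => m.insert v (m.getD v 0 + 1)) (PySem.Dict.empty : PySem.Dict Int Int)).keys.foldl
                     (fun ix v => ix.modify v [] (· ++ [p.1])) st.2))
                (PySem.Dict.empty, PySem.Dict.empty)).2).getD q.1 []).foldl
              (fun pc j' => if j' < p.1 then pc.modify (p.1, j') 0 (· + q.2) else pc) pc) pc)
        (PySem.Dict.empty : PySem.Dict (Int × Int) Int)).getD (i, j) 0)
      = ((d.getD i []).map (fun di => if (d.getD j []).contains di then (1 : Int) else 0)).sum := by
  have hndf : (d.items.map Prod.fst).Nodup := hnd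
  rcases List.mem_map.1 hi with ⟨pi, hpi, hpi1⟩
  rcases List.mem_map.1 hj with ⟨pj, hpj, hpj1⟩
  have hmi : (i, pi.2) ∈ d.items := by rw [← hpi1]; exact hpi
  have hmj : (j, pj.2) ∈ d.items := by rw [← hpj1]; exact hpj
  have hgi : d.getD i [] = pi.2 := PySem.Dict.getD_of_mem_items d hmi hnd []
  have hgj : d.getD j [] = pj.2 := PySem.Dict.getD_of_mem_items d hmj hnd []
  simp only [PySem.List.foldl_prod_mk
      (f := fun (ms : PySem.Dict Int (PySem.Dict Int Int)) (p : Int × List Int) => ms.insert p.1 (p.2.foldl (fun m v => m.insert v (m.getD v 0 + 1)) (PySem.Dict.empty : PySem.Dict Int Int)))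
      (g := fun (ix : PySem.Dict Int (List Int)) (p : Int × List Int) => (p.2.foldl (fun m v => m.insert v (m.getD v 0 + 1)) (PySem.Dict.empty : PySem.Dict Int Int)).keys.foldl
         (fun ix v => ix.modify v [] (· ++ [p.1])) ix)]
  simp only [PySem.Dict.foldl_insert_getD_add_one_eq_counter, PySem.Dict.keys_counter]
  rw [PySem.Dict.items_foldl_insert_fresh d.items Prod.fst (fun p => PySem.Dict.counter p.2)
        PySem.Dict.empty (by intro a _; simp) hndf]
  have hie : (PySem.Dict.empty : PySem.Dict Int (PySem.Dict Int Int)).items = [] := rfl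
  rw [hie, List.nil_append]
  rw [cnt_all, PySem.Dict.getD_empty, zero_add]
  set ixd := d.items.foldl (fun ix p =>
      (PySem.Set.ofList p.2).foldl (fun ix u => ix.modify u [] (· ++ [p.1])) ix) PySem.Dict.empty with hix
  have hbv : ∀ v : Int, ((ixd.getD v []).count j : Int) = if v ∈ pj.2 then 1 else 0 := by
    intro v
    rw [hix, idx_all, PySem.Dict.getD_empty, List.nil_append,
        bucket_count d.items j pj.2 v hndf hmj]
  have hcongr : ((d.items.map (fun p => (p.1, PySem.Dict.counter p.2))).map
        (fun p => if p.1 = i ∧ j < p.1 then (p.2.items.map (fun q => q.2 * ((ixd.getD q.1 []).count j : Int))).sum else 0))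
      = ((d.items.map (fun p => (p.1, PySem.Dict.counter p.2))).map
        (fun p => if p.1 = i then (p.2.items.map (fun q => q.2 * ((ixd.getD q.1 []).count j : Int))).sum else 0)) := by
    apply List.map_congr_left
    intro p _
    by_cases h : p.1 = i
    · simp [h, hji]
    · simp [h]
  rw [hcongr,
      uniq_sum (d.items.map (fun p => (p.1, PySem.Dict.counter p.2))) i (PySem.Dict.counter pi.2)
        (fun md => (md.items.map (fun q => q.2 * ((ixd.getD q.1 []).count j : Int))).sum)
        (by simpa [List.map_map, Function.comp] using hndf)
        (by simpa [hpi1] using List.mem_map_of_mem (f := fun p => (p.1, PySem.Dict.counter p.2)) hpi)]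
  rw [PySem.Dict.items_counter, List.map_map]
  have hstep : (pi.2.map (fun di => if (pj.2).contains di then (1 : Int) else 0)).sum
      = ((PySem.Set.ofList pi.2).map ((fun q : Int × Int => q.2 * ((ixd.getD q.1 []).count j : Int)) ∘ (fun k => (k, (pi.2.count k : Int))))).sum := by
    rw [← group_sum (fun v => if (pj.2).contains v then (1 : Int) else 0) pi.2]
    apply congrArg List.sum
    apply List.map_congr_left
    intro v _
    simp only [Function.comp]
    rw [hbv v]
    by_cases hv : v ∈ pj.2
    · simp [hv]
    · simp [hv]
  rw [hgi, hgj, hstep]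

-- ===== VERDICT (by name: the statement is the Claim_ definition above) =====
theorem get_common_beacons_spec : Claim_equal_get_common_beacons := by
  intro distances comb _
  unfold Spec_get_common_beacons
  simp only [get_common_beacons, get_common_beacons_alt]
  refine congrArg _ (congrArg PySem.Dict.items ?_)
  apply PySem.List.foldl_congr_mem
  intro acc i hi
  apply PySem.List.foldl_congr_mem
  intro acc2 j hj
  by_cases hji : j < i
  · simp only [if_pos hji]
    rw [pair_count_eq (PySem.Dict.ofList distances) (PySem.Dict.nodup_keys_ofList distances) i j hi hj hji]
  · simp only [if_neg hji]
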